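-- pv_equiv track=rewrite | github.com/faucetsdn/faucet | clib/config_generator.py | extend_port_order
-- ===== SOURCE A (Python) =====
-- def extend_port_order(port_order=None, max_length=16):
--     """
--     Extends the pattern of port_port order up to max_length
--
--     Args:
--         port_order (list): List of integers in an order to extend
--         max_length (int): Maximum length to extend the list to
--     """
--     if not port_order:
--         return list(range(max_length + 1))
--     if len(port_order) >= max_length:
--         return port_order
--     extend_order = []
--     order = port_order
--     start_port = max(port_order) + 1
--     while len(port_order) + len(extend_order) < max_length:
--         for i in order:
--             extend_order.append(start_port + i)
--             if len(port_order) + len(extend_order) >= max_length: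
--                 break
--         start_port = max(extend_order) + 1
--     return port_order + extend_order
-- ===== SOURCE B (Python) =====
-- def extend_port_order(port_order=None, max_length=16):
--     """
--     Extends the pattern of port order up to max_length.
--
--     Each extension element is derived directly from its index: block b
--     (1-based) of the extension is port_order shifted by b * step, where
--     step = max(port_order) + 1.
--     """
--     if not port_order:
--         return list(range(max_length + 1))
--     L = len(port_order)
--     if L >= max_length:
--         return port_order
--     step = max(port_order) + 1
--     extend = [(j // L + 1) * step + port_order[j % L] for j in range(max_length - L)]
--     return port_order + extend
-- ===== Notes on version B (the rewrite author's own statement) =====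
-- stated objective: simpler
-- what changed: Replaces A's nested while/for loop (which rescans the growing extension with max() every lap) by one flat comprehension deriving each extension element from its index with block arithmetic (j//L and j%L) and a closed-form block start.
-- intended difference: On nonempty port lists whose maximum is <= -2 (so step = max+1 is negative) with max_length > 3*len(port_order), A's rescanned max makes every block from the third start at 2*step, so the extension stalls and repeats values; B starts block b at b*step, continuing the arithmetic pattern uniformly, which is the intended extension of the pattern. — e.g. on extend_port_order(some [-3], 4): A returns [-3, -5, -7, -7], B returns [-3, -5, -7, -9]
import Mathlib
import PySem

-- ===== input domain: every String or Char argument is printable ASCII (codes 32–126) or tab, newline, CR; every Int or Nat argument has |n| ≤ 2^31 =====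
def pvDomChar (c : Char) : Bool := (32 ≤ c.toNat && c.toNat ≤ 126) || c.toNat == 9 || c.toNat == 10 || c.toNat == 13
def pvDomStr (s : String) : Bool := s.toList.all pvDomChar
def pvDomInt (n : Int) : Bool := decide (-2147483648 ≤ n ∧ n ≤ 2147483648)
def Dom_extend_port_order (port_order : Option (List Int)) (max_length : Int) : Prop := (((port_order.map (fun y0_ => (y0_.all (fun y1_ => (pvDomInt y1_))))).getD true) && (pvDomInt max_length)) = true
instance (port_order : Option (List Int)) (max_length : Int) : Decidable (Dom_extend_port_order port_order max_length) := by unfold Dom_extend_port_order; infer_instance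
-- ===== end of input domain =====

-- B replaces A's nested while/for (with a rescanned max each lap) by one flat
-- closed-form pass deriving each extension element from its index
-- (objective: simpler); on all-negative port lists with max_length > 3*len,
-- B's uniform arithmetic extension intentionally differs from A (see D_ below).

-- ===== PORT A =====
-- inner 'for i in order: extend_order.append(start_port + i); if … break'
def eoInner (order : List Int) (start_port : Int) (L ml : Int) (ext : List Int) : List Int :=
  match order with
  | [] => ext
  | i :: rest =>
    let ext' := ext ++ [start_port + i]
    if L + (ext'.length : Int) ≥ ml then ext'
    else eoInner rest start_port L ml ext'

theorem eoInner_len_le (order : List Int) (s L ml : Int) (ext : List Int) :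
    ext.length ≤ (eoInner order s L ml ext).length := by
  induction order generalizing ext with
  | nil => simp [eoInner]
  | cons i rest ih =>
    simp only [eoInner]
    split
    · simp
    · exact le_trans (by simp) (ih (ext ++ [s + i]))

theorem eoInner_len_lt (i : Int) (rest : List Int) (s L ml : Int) (ext : List Int) :
    ext.length < (eoInner (i :: rest) s L ml ext).length := by
  simp only [eoInner]
  split
  · simp
  · exact lt_of_lt_of_le (by simp) (eoInner_len_le rest s L ml (ext ++ [s + i]))

-- the 'while len(port_order)+len(extend_order) < max_length' loop; po ≠ [] is
-- carried as a hypothesis because it is what makes the Python loop terminate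
def eoWhile (po : List Int) (hpo : po ≠ []) (ml : Int) (ext : List Int) (start_port : Int) : List Int :=
  if h : (po.length : Int) + (ext.length : Int) < ml then
    let ext' := eoInner po start_port (po.length : Int) ml ext
    -- max(extend_order): ext' is never empty here, the default is unreachable
    eoWhile po hpo ml ext' ((PySem.List.max? ext' (fun y => y)).getD 0 + 1)
  else ext
termination_by (ml - ((po.length : Int) + (ext.length : Int))).toNat
decreasing_by
  obtain ⟨i, rest, rfl⟩ := List.exists_cons_of_ne_nil hpo
  have := eoInner_len_lt i rest start_port ((i :: rest).length : Int) ml ext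
  omega

def extend_port_order (port_order : Option (List Int)) (max_length : Int) : List Int :=
  match port_order with
  | none => PySem.List.pyRange 0 (max_length + 1) 1
  | some po =>
    if hpo : po = [] then PySem.List.pyRange 0 (max_length + 1) 1
    else if (po.length : Int) ≥ max_length then po
    else
      -- max(port_order): po ≠ [] here, the default is unreachable
      po ++ eoWhile po hpo max_length [] ((PySem.List.max? po (fun y => y)).getD 0 + 1)

-- ===== PORT B =====
def extend_port_order_alt (port_order : Option (List Int)) (max_length : Int) : List Int :=
  match port_order with
  | none => PySem.List.pyRange 0 (max_length + 1) 1
  | some po =>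
    if po = [] then PySem.List.pyRange 0 (max_length + 1) 1
    else
      let L := po.length
      if (L : Int) ≥ max_length then po
      else
        let step := (PySem.List.max? po (fun y => y)).getD 0 + 1
        po ++ (List.range (max_length - (L : Int)).toNat).map
          (fun j => ((j / L + 1 : Nat) : Int) * step + PySem.List.pyGetD po ((j % L : Nat) : Int) 0)

-- ===== PRECONDITION & SPEC =====
-- max(l) of a nonempty list as a plain value (used by D_ below and by the proofs)
def myMaxVal (l : List Int) : Int :=
  match l with
  | [] => 0
  | x :: t => t.foldl max x

-- On nonempty port lists whose maximum is ≤ -2 (so step = max+1 is negative)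
-- with max_length > 3*len(port_order), A's rescanned max makes every block
-- from the third start at 2*step, so the extension stalls and repeats values;
-- B starts block b at b*step, continuing the arithmetic pattern uniformly,
-- which is the intended extension of the pattern.
def D_extend_port_order (port_order : Option (List Int)) (max_length : Int) : Prop :=
  port_order.getD [] ≠ [] ∧ myMaxVal (port_order.getD []) ≤ -2 ∧
    ((port_order.getD []).length : Int) < max_length ∧
    3 * ((port_order.getD []).length : Int) < max_length
instance (port_order : Option (List Int)) (max_length : Int) : Decidable (D_extend_port_order port_order max_length) := by unfold D_extend_port_order; infer_instance

def Spec_extend_port_order (port_order : Option (List Int)) (max_length : Int) (out : List Int) : Prop := ¬ D_extend_port_order port_order max_length → out = extend_port_order_alt port_order max_length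
instance (port_order : Option (List Int)) (max_length : Int) (out : List Int) : Decidable (Spec_extend_port_order port_order max_length out) := by unfold Spec_extend_port_order; infer_instance

def pvDiffWitness_extend_port_order : Option (List Int) × Int := (some [-3], 4)
def pvDiffWitnessOut_extend_port_order : (List Int) × (List Int) := ([-3, -5, -7, -7], [-3, -5, -7, -9])

-- ===== CLAIM (what is proved, stated in full; the proofs are below) =====
def Claim_unchanged_extend_port_order : Prop := ∀ (port_order : Option (List Int)) (max_length : Int), Dom_extend_port_order port_order max_length → Spec_extend_port_order port_order max_length (extend_port_order port_order max_length)
def Claim_changed_extend_port_order : Prop := Dom_extend_port_order (pvDiffWitness_extend_port_order.1) (pvDiffWitness_extend_port_order.2) ∧ D_extend_port_order (pvDiffWitness_extend_port_order.1) (pvDiffWitness_extend_port_order.2) ∧ extend_port_order (pvDiffWitness_extend_port_order.1) (pvDiffWitness_extend_port_order.2) = pvDiffWitnessOut_extend_port_order.1 ∧ extend_port_order_alt (pvDiffWitness_extend_port_order.1) (pvDiffWitness_extend_port_order.2) = pvDiffWitnessOut_extend_port_order.2 ∧ pvDiffWitnessOut_extend_port_order.1 ≠ pvDiffWitnessOu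t_extend_port_order.2
def Claim_exact_extend_port_order : Prop := ∀ (port_order : Option (List Int)) (max_length : Int), Dom_extend_port_order port_order max_length → D_extend_port_order port_order max_length → extend_port_order port_order max_length ≠ extend_port_order_alt port_order max_length

-- ===== LEMMAS AND PROOFS =====

-- A's closed-form block start: (min b 2) * step once step ≤ 0, else b * step
def startFn (step : Int) (b : Nat) : Int :=
  if step > 0 then (b : Int) * step else ((min b 2 : Nat) : Int) * step

-- the closed-form j-th extension element of A
def fSpec (po : List Int) (step : Int) (j : Nat) : Int :=
  startFn step (j / po.length + 1) + po.getD (j % po.length) 0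

-- the closed-form j-th extension element of B
def fSpecB (po : List Int) (step : Int) (j : Nat) : Int :=
  ((j / po.length + 1 : Nat) : Int) * step + po.getD (j % po.length) 0

theorem max?_getD_eq_myMaxVal (l : List Int) :
    (PySem.List.max? l (fun y => y)).getD 0 = myMaxVal l := by
  cases l with
  | nil => simp [PySem.List.max?, myMaxVal]
  | cons x t => rw [PySem.List.max?_id_cons]; rfl

theorem foldl_max_max (u : List Int) (a b : Int) :
    u.foldl max (max a b) = max a (u.foldl max b) := by
  induction u generalizing b with
  | nil => rfl
  | cons c u ih => simp only [List.foldl_cons, max_assoc, ih]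

theorem myMaxVal_append (xs ys : List Int) (hx : xs ≠ []) (hy : ys ≠ []) :
    myMaxVal (xs ++ ys) = max (myMaxVal xs) (myMaxVal ys) := by
  obtain ⟨x, t, rfl⟩ := List.exists_cons_of_ne_nil hx
  obtain ⟨y, u, rfl⟩ := List.exists_cons_of_ne_nil hy
  simp only [myMaxVal, List.cons_append, List.foldl_append, List.foldl_cons]
  rw [← foldl_max_max u (t.foldl max x) y]

theorem foldl_max_map_add (t : List Int) (c x : Int) :
    (t.map (fun y => c + y)).foldl max (c + x) = c + t.foldl max x := by
  induction t generalizing x with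
  | nil => rfl
  | cons a t ih =>
    simp only [List.map_cons, List.foldl_cons, ← ih]
    congr 1
    omega

theorem myMaxVal_shift (po : List Int) (hpo : po ≠ []) (c : Int) :
    myMaxVal (po.map (fun y => c + y)) = c + myMaxVal po := by
  obtain ⟨x, t, rfl⟩ := List.exists_cons_of_ne_nil hpo
  simp only [myMaxVal, List.map_cons]
  exact foldl_max_map_add t c x

theorem blockDiv (L b i : Nat) (hL : 0 < L) (hi : i < L) : (b * L + i) / L = b := by
  rw [Nat.add_comm, Nat.add_mul_div_right _ _ hL, Nat.div_eq_of_lt hi, Nat.zero_add]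

theorem blockMod (L b i : Nat) (hi : i < L) : (b * L + i) % L = i := by
  rw [Nat.add_comm, Nat.add_mul_mod_self_right, Nat.mod_eq_of_lt hi]

-- one block of the closed form, as a shift of po
theorem block_eq_shift (po : List Int) (step : Int) (b : Nat) :
    (List.range po.length).map (fun i => fSpec po step (b * po.length + i)) =
      po.map (fun y => startFn step (b + 1) + y) := by
  apply List.ext_getElem (by simp)
  intro i h1 h2
  simp only [List.getElem_map, List.getElem_range]
  have hi : i < po.length := by simpa using h2
  simp only [fSpec]
  rw [blockDiv po.length b i (by omega) hi, blockMod po.length b i hi]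
  simp [List.getD_eq_getElem?_getD, hi]

-- max of k completed blocks
theorem max_blocks (po : List Int) (hpo : po ≠ []) (step : Int)
    (hstep : step = myMaxVal po + 1) (b : Nat) (hb : 1 ≤ b) :
    myMaxVal ((List.range (b * po.length)).map (fSpec po step)) =
      (if step > 0 then (b : Int) * step else step) + myMaxVal po := by
  induction b with
  | zero => omega
  | succ b ih =>
    have hL : 1 ≤ po.length := List.length_pos_iff.mpr hpo
    by_cases hb1 : b = 0
    · subst hb1
      have : (List.range (1 * po.length)).map (fSpec po step) =
          po.map (fun y => startFn step 1 + y) := by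
        rw [← block_eq_shift po step 0]
        simp
      rw [this, myMaxVal_shift po hpo]
      simp only [startFn]
      split <;> simp
    · have hb' : 1 ≤ b := by omega
      have hsplit : List.range ((b + 1) * po.length) =
          List.range (b * po.length) ++ (List.range po.length).map (fun i => b * po.length + i) := by
        rw [Nat.succ_mul, List.range_add]
      rw [hsplit, List.map_append, List.map_map,
          myMaxVal_append _ _ (by simp only [ne_eq, List.map_eq_nil_iff, List.range_eq_nil]; exact Nat.mul_ne_zero (by omega) (by omega)) (by simpa using hpo),
          ih hb']
      have : (List.range po.length).map (fSpec po step ∘ fun i => b * po.length + i) =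
          po.map (fun y => startFn step (b + 1) + y) := by
        rw [← block_eq_shift po step b]; rfl
      rw [this, myMaxVal_shift po hpo]
      simp only [startFn]
      split
      · rename_i hpos
        rw [max_eq_right (by push_cast; nlinarith)]
      · rename_i hnpos
        have h2 : min (b + 1) 2 = 2 := by omega
        rw [h2]
        rw [max_eq_left (by push_cast; omega)]

-- the inner for-loop appends a prefix of (start + ·) over order
theorem eoInner_spec (ml : Int) : ∀ (order : List Int) (s L : Int) (ext : List Int),
    L + (ext.length : Int) < ml →
    eoInner order s L ml ext =
      ext ++ (order.take (ml - L - ext.length).toNat).map (fun y => s + y) := by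
  intro order
  induction order with
  | nil => intro s L ext h; simp [eoInner]
  | cons i rest ih =>
    intro s L ext h
    simp only [eoInner]
    have hneed : 1 ≤ (ml - L - ext.length).toNat := by omega
    split
    · rename_i hbr
      have : (ml - L - ext.length).toNat = 1 := by
        simp at hbr; omega
      rw [this]
      simp
    · rename_i hbr
      simp only [not_le] at hbr
      rw [ih s L (ext ++ [s + i]) (by simpa using hbr)]
      have : (ml - L - ((ext ++ [s + i]).length : Int)).toNat = (ml - L - ext.length).toNat - 1 := by
        simp; omega
      rw [this]
      obtain ⟨m, hm⟩ : ∃ m, (ml - L - ext.length).toNat = m + 1 := ⟨_, (Nat.succ_pred_eq_of_pos hneed).symm⟩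
      rw [hm]
      simp

-- a taken prefix of po, rewritten as a range-indexed map
theorem take_map_eq_range (po : List Int) (s : Int) (m : Nat) :
    (po.take m).map (fun y => s + y) =
      (List.range (min m po.length)).map (fun i => s + po.getD i 0) := by
  apply List.ext_getElem (by simp)
  intro i h1 h2
  have hi : i < po.length := by simp at h1; omega
  simp [List.getD_eq_getElem?_getD, hi]

-- the while loop, from k completed blocks, produces the whole closed form
theorem eoWhile_spec (po : List Int) (hpo : po ≠ []) (ml step : Int)
    (hstep : step = myMaxVal po + 1) (hml : (po.length : Int) < ml) :
    ∀ (d k : Nat), d = (ml - (po.length : Int)).toNat - k * po.length →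
    k * po.length < (ml - (po.length : Int)).toNat →
    eoWhile po hpo ml ((List.range (k * po.length)).map (fSpec po step)) (startFn step (k + 1)) =
      (List.range (ml - (po.length : Int)).toNat).map (fSpec po step) := by
  intro d
  induction d using Nat.strong_induction_on with
  | _ d IH =>
    intro k hd hk
    have hL : 1 ≤ po.length := List.length_pos_iff.mpr hpo
    set n : Nat := (ml - (po.length : Int)).toNat with hn
    have hnml : (n : Int) = ml - po.length := by omega
    rw [eoWhile]
    rw [dif_pos (by simp; omega)]
    have hcond : (po.length : Int) + (((List.range (k * po.length)).map (fSpec po step)).length : Int) < ml := by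
      simp; omega
    rw [eoInner_spec ml po (startFn step (k + 1)) (po.length : Int) _ hcond]
    have hlen : (((List.range (k * po.length)).map (fSpec po step)).length : Int) = (k * po.length : Nat) := by simp
    have hneed : (ml - (po.length : Int) - (((List.range (k * po.length)).map (fSpec po step)).length : Int)).toNat = n - k * po.length := by
      simp; omega
    rw [hneed, take_map_eq_range]
    have hsm : (k+1) * po.length = k * po.length + po.length := Nat.succ_mul k po.length
    have hmin : min (n - k * po.length) po.length = min ((k+1) * po.length) n - k * po.length := by
      rw [hsm]
      rcases Nat.lt_or_ge n (k * po.length + po.length) with h | h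
      · rw [min_eq_right (show n ≤ k * po.length + po.length by omega)]; omega
      · rw [min_eq_left (show k * po.length + po.length ≤ n by omega)]; omega
    have hext' : (List.range (k * po.length)).map (fSpec po step) ++
        (List.range (min (n - k * po.length) po.length)).map (fun i => startFn step (k + 1) + po.getD i 0) =
        (List.range (min ((k+1) * po.length) n)).map (fSpec po step) := by
      rw [hmin]
      have hsplit : List.range (min ((k+1) * po.length) n) =
          List.range (k * po.length) ++ (List.range (min ((k+1) * po.length) n - k * po.length)).map (fun i => k * po.length + i) := by
        rw [hsm]
        conv_lhs => rw [show min (k * po.length + po.length) n =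
            k * po.length + (min (k * po.length + po.length) n - k * po.length) from by omega,
          List.range_add]
      rw [hsplit, List.map_append, List.map_map]
      congr 1
      apply List.ext_getElem (by simp)
      intro i h1 h2
      have hiL : i < po.length := by
        rw [hsm] at h1
        simp at h1
        omega
      simp only [List.getElem_map, List.getElem_range, Function.comp]
      simp only [fSpec]
      rw [blockDiv po.length k i (by omega) hiL, blockMod po.length k i hiL]
    rw [hext']
    by_cases hnext : (k + 1) * po.length < n
    · have hminfull : min ((k+1) * po.length) n = (k+1) * po.length := min_eq_left (le_of_lt hnext)
      rw [hminfull]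
      have hmax : (PySem.List.max? ((List.range ((k+1) * po.length)).map (fSpec po step)) (fun y => y)).getD 0 + 1 =
          startFn step (k + 1 + 1) := by
        rw [max?_getD_eq_myMaxVal, max_blocks po hpo step hstep (k+1) (by omega)]
        simp only [startFn]
        split
        · rw [hstep]; push_cast; ring
        · have : min (k + 1 + 1) 2 = 2 := by omega
          rw [this, hstep]; push_cast; ring
      show eoWhile po hpo ml ((List.range ((k+1) * po.length)).map (fSpec po step))
          ((PySem.List.max? ((List.range ((k+1) * po.length)).map (fSpec po step)) (fun y => y)).getD 0 + 1) =
        (List.range n).map (fSpec po step)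
      rw [hmax]
      exact IH (n - (k+1) * po.length) (by rw [hsm] at hnext ⊢; omega) (k+1) (by rfl) hnext
    · have hminn : min ((k+1) * po.length) n = n := min_eq_right (by omega)
      rw [hminn]
      show eoWhile po hpo ml ((List.range n).map (fSpec po step))
          ((PySem.List.max? ((List.range n).map (fSpec po step)) (fun y => y)).getD 0 + 1) =
        (List.range n).map (fSpec po step)
      rw [eoWhile]
      rw [dif_neg (by simp; omega)]

-- A on the interesting branch, in closed form
theorem A_closed (po : List Int) (hpo : po ≠ []) (ml : Int) (hml : (po.length : Int) < ml) :
    extend_port_order (some po) ml =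
      po ++ (List.range (ml - (po.length : Int)).toNat).map (fSpec po (myMaxVal po + 1)) := by
  simp only [extend_port_order]
  rw [dif_neg hpo, if_neg (by omega)]
  congr 1
  set step : Int := myMaxVal po + 1 with hstepdef
  have hL : 1 ≤ po.length := List.length_pos_iff.mpr hpo
  have hstart1 : step = startFn step 1 := by
    simp only [startFn]
    split <;> simp
  rw [max?_getD_eq_myMaxVal, ← hstepdef]
  calc eoWhile po hpo ml [] step
      = eoWhile po hpo ml ((List.range (0 * po.length)).map (fSpec po step)) (startFn step (0 + 1)) := by
        rw [← hstart1]; simp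
    _ = (List.range (ml - (po.length : Int)).toNat).map (fSpec po step) := by
        exact eoWhile_spec po hpo ml step rfl hml _ 0 rfl (by simp; omega)

-- B on the interesting branch, in closed form
theorem B_closed (po : List Int) (hpo : po ≠ []) (ml : Int) (hml : (po.length : Int) < ml) :
    extend_port_order_alt (some po) ml =
      po ++ (List.range (ml - (po.length : Int)).toNat).map (fSpecB po (myMaxVal po + 1)) := by
  simp only [extend_port_order_alt]
  rw [if_neg hpo, if_neg (by omega)]
  rw [max?_getD_eq_myMaxVal]
  congr 1
  apply List.map_congr_left
  intro j _
  rw [PySem.List.pyGetD_natCast]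
  rfl

-- ===== VERDICT (by name: the statement is the Claim_ definition above) =====
theorem extend_port_order_spec : Claim_unchanged_extend_port_order := by
  unfold Claim_unchanged_extend_port_order Spec_extend_port_order
  intro port_order ml _ hnD
  match port_order with
  | none => rfl
  | some po =>
    by_cases hpo : po = []
    · simp [hpo, extend_port_order, extend_port_order_alt]
    · by_cases hlen : (po.length : Int) ≥ ml
      · simp only [extend_port_order, extend_port_order_alt]
        rw [dif_neg hpo, if_neg hpo, if_pos hlen, if_pos hlen]
      · have hml : (po.length : Int) < ml := by omega
        rw [A_closed po hpo ml hml, B_closed po hpo ml hml]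
        congr 1
        apply List.map_congr_left
        intro j hj
        set step : Int := myMaxVal po + 1 with hstepdef
        have hL : 1 ≤ po.length := List.length_pos_iff.mpr hpo
        simp only [fSpec, fSpecB, startFn]
        split
        · rfl
        · rename_i hnpos
          by_cases hz : step = 0
          · -- step = 0: both block starts are 0
            simp [hz]
          · -- step < 0: ¬D_ forces ml ≤ 3*len, so only blocks 1 and 2 are reached
            have hneg : myMaxVal po ≤ -2 := by omega
            have h3L : ml ≤ 3 * (po.length : Int) := by
              by_contra hc
              exact hnD ⟨by simpa using hpo, by simpa using hneg, by simpa using hml, by simpa using (by omega : 3 * ((po : List Int).length : Int) < ml)⟩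
            have hjlt : j < 2 * po.length := by
              simp only [List.mem_range] at hj
              omega
            have hdiv : j / po.length + 1 ≤ 2 := by
              have := (Nat.div_lt_iff_lt_mul (by omega : 0 < po.length)).mpr (by omega : j < 2 * po.length)
              omega
            rw [min_eq_left hdiv]

theorem extend_port_order_changed : Claim_changed_extend_port_order := by
  unfold Claim_changed_extend_port_order
  refine ⟨by decide, by decide, ?_, by decide, by decide⟩
  rw [show pvDiffWitness_extend_port_order.1 = some [-3] from rfl,
      show pvDiffWitness_extend_port_order.2 = (4 : Int) from rfl,
      A_closed [-3] (by decide) 4 (by decide)]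
  decide

theorem extend_port_order_tight : Claim_exact_extend_port_order := by
  unfold Claim_exact_extend_port_order
  intro port_order ml _ hD
  match port_order with
  | none => exact absurd hD.1 (by simp)
  | some po =>
    obtain ⟨hpo', hneg, hml, h3L⟩ := hD
    have hpo : po ≠ [] := by simpa using hpo'
    have hml' : ((po : List Int).length : Int) < ml := by simpa using hml
    have hneg' : myMaxVal po ≤ -2 := by simpa using hneg
    have h3L' : 3 * ((po : List Int).length : Int) < ml := by simpa using h3L
    rw [A_closed po hpo ml hml', B_closed po hpo ml hml']
    intro heq
    have hmaps := List.append_cancel_left heq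
    have hL : 1 ≤ po.length := List.length_pos_iff.mpr hpo
    have h2L : 2 * po.length < (ml - (po.length : Int)).toNat := by omega
    have hlen1 : 2 * po.length < ((List.range (ml - (po.length : Int)).toNat).map (fSpec po (myMaxVal po + 1))).length := by
      simpa using h2L
    have hlen2 : 2 * po.length < ((List.range (ml - (po.length : Int)).toNat).map (fSpecB po (myMaxVal po + 1))).length := by
      simpa using h2L
    have hel := List.getElem_of_eq hmaps hlen1
    simp only [List.getElem_map, List.getElem_range] at hel
    set step : Int := myMaxVal po + 1 with hstepdef
    have hstepneg : step < 0 := by omega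
    have hdiv2 : 2 * po.length / po.length = 2 := by
      rw [Nat.mul_div_cancel _ (by omega : 0 < po.length)]
    simp only [fSpec, fSpecB, startFn, if_neg (by omega : ¬ step > 0), hdiv2] at hel
    norm_num at hel
    omega
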